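-- pv_equiv track=rewrite | github.com/alessandrofd/leetcode-python | 1125-smallest-sufficient-team.py | smallestSufficientTeam_bottom_up_bitmap
-- ===== SOURCE A (Python) =====
-- from typing import List
-- from functools import reduce
--
-- def smallestSufficientTeam_bottom_up_bitmap(
--     req_skills: List[str], people: List[List[str]]
-- ) -> List[int]:
--     num_skills = len(req_skills)
--     num_people = len(people)
--
--     skill_ids = {skill: i for i, skill in enumerate(req_skills)}
--     skills_by_person = [
--         reduce(lambda a, b: a | 1 << skill_ids[b], skills, 0) for skills in people
--     ]
--
--     dp = [(1 << num_people) - 1] * (1 << num_skills)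
--     dp[0] = 0
--
--     for skills in range(1, (1 << num_skills)):
--         for person in range(num_people):
--             other_skills = skills & ~skills_by_person[person]
--             if other_skills != skills:
--                 team = dp[other_skills] | (1 << person)
--                 if team.bit_count() < dp[skills].bit_count():
--                     dp[skills] = team
--
--     team_mask = dp[-1]
--     team = []
--     for person in range(num_people):
--         if team_mask & (1 << person):
--             team.append(person)
--     return team
-- ===== SOURCE B (Python) =====
-- from typing import List
-- from functools import lru_cache
--
--
-- def smallestSufficientTeam_bottom_up_bitmap(
--     req_skills: List[str], people: List[List[str]]
-- ) -> List[int]: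
--     num_people = len(people)
--     skill_ids = {skill: i for i, skill in enumerate(req_skills)}
--     skills_by_person = []
--     for skills in people:
--         m = 0
--         for s in skills:
--             m |= 1 << skill_ids[s]
--         skills_by_person.append(m)
--
--     @lru_cache(maxsize=None)
--     def solve(mask):
--         if mask == 0:
--             return 0
--         best = (1 << num_people) - 1
--         for person in range(num_people):
--             other = mask & ~skills_by_person[person]
--             if other != mask:
--                 cand = solve(other) | (1 << person)
--                 if cand.bit_count() < best.bit_count():
--                     best = cand
--         return best
--
--     team_mask = solve((1 << len(req_skills)) - 1)
--     return [p for p in range(num_people) if team_mask >> p & 1]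
-- ===== Notes on version B (the rewrite author's own statement) =====
-- stated objective: alternative
-- what changed: Replaces A's bottom-up DP over an array of all 2^num_skills masks with a top-down lru_cache-memoized recursion solve(mask) over skill masks (same recurrence, person order and strict-< tie-breaking), expanding the resulting people-bitmask by a comprehension.
import Mathlib
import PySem

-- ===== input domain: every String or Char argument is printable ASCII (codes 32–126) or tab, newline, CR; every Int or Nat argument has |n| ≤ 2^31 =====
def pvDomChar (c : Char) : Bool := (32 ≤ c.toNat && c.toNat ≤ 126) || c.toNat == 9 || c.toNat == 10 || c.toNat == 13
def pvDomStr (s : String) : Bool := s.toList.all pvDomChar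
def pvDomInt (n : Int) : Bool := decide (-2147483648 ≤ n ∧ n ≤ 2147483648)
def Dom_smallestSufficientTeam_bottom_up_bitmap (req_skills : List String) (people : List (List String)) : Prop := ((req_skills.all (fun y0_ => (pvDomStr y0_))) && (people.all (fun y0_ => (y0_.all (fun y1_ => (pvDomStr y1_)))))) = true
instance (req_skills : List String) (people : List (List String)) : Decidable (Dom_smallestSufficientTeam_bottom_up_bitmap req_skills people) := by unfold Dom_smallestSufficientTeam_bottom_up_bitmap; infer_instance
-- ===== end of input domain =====

-- B re-implements A's bottom-up DP over all skill masks as a top-down memoized recursion on the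
-- full-skill mask (same recurrence, same tie-breaking); equivalence of the two traversals is proved below.

-- ===== PORT A =====
-- the body of A's inner `for person in range(num_people)` loop (named so the lemmas can cite it)
def pvAInnerBody (sbp : List Int) (skills : Int) (dp : List Int) (person : Int) : List Int :=
  let other_skills := PySem.Int.band skills (Int.not (PySem.List.pyGetD sbp person 0))
  if other_skills ≠ skills then
    let team := PySem.Int.bor (PySem.List.pyGetD dp other_skills 0) ((1 : Int) <<< person.toNat)
    if PySem.Int.bitCount team < PySem.Int.bitCount (PySem.List.pyGetD dp skills 0) then
      PySem.List.pySetD dp skills team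
    else dp
  else dp

-- one iteration of A's outer `for skills in range(1, 1 << num_skills)` loop
def pvADpStep (sbp : List Int) (numPeople : Nat) (dp : List Int) (skills : Int) : List Int :=
  (PySem.List.pyRange 0 (numPeople : Int) 1).foldl (pvAInnerBody sbp skills) dp

def smallestSufficientTeam_bottom_up_bitmap (req_skills : List String) (people : List (List String)) : List Int :=
  let num_skills : Nat := req_skills.length          -- len() is nonnegative
  let num_people : Nat := people.length
  let skill_ids : PySem.Dict String Int :=
    (PySem.List.enumerate req_skills 0).foldl (fun d p => d.insert p.2 p.1) PySem.Dict.empty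
  -- skill_ids[b] raises KeyError when b is not a required skill: Pre_ excludes that, getD is the total form;
  -- the skill index is a nonnegative enumerate index, so .toNat is exact as the shift amount
  let skills_by_person : List Int :=
    people.map (fun skills =>
      skills.foldl (fun a b => PySem.Int.bor a ((1 : Int) <<< (skill_ids.getD b 0).toNat)) 0)
  let dp0 : List Int :=
    PySem.List.pySetD (PySem.List.pyRepeat [((1 : Int) <<< num_people) - 1] ((1 <<< num_skills : Nat) : Int)) 0 0
  let dp := (PySem.List.pyRange 1 ((1 <<< num_skills : Nat) : Int) 1).foldl (pvADpStep skills_by_person num_people) dp0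
  let team_mask := PySem.List.pyGetD dp (-1) 0
  (PySem.List.pyRange 0 (num_people : Int) 1).foldl
    (fun team person =>
      if PySem.Int.band team_mask ((1 : Int) <<< person.toNat) ≠ 0 then team ++ [person] else team) []

-- ===== PORT B =====
-- top-down memoized `solve(mask)` from Source B.  lru_cache only caches, so the port is the plain
-- recursion; the extra `fuel` argument (always called with fuel > mask, and each recursive call is
-- on a strictly smaller mask) only makes the recursion structural — it never changes the value.
def pvSolveGo (sbp : List Int) (solve : Nat → Int) (mask : Nat) : List Int → Int → Int
  | [], best => best
  | person :: rest, best =>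
    let other := PySem.Int.band (mask : Int) (Int.not (PySem.List.pyGetD sbp person 0))
    if other ≠ (mask : Int) then
      let cand := PySem.Int.bor (solve other.toNat) ((1 : Int) <<< person.toNat)
      pvSolveGo sbp solve mask rest
        (if PySem.Int.bitCount cand < PySem.Int.bitCount best then cand else best)
    else pvSolveGo sbp solve mask rest best

def pvSolveFuel (sbp : List Int) (P : Nat) : Nat → Nat → Int
  | 0, _ => 0
  | fuel + 1, mask =>
    if mask = 0 then 0
    else pvSolveGo sbp (pvSolveFuel sbp P fuel) mask (PySem.List.pyRange 0 (P : Int) 1) (((1 : Int) <<< P) - 1)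

def pvSolve (sbp : List Int) (P : Nat) (mask : Nat) : Int := pvSolveFuel sbp P (mask + 1) mask

def smallestSufficientTeam_bottom_up_bitmap_alt (req_skills : List String) (people : List (List String)) : List Int :=
  let num_people : Nat := people.length
  let skill_ids : PySem.Dict String Int :=
    (PySem.List.enumerate req_skills 0).foldl (fun d p => d.insert p.2 p.1) PySem.Dict.empty
  let skills_by_person : List Int :=
    people.foldl (fun acc skills =>
      acc ++ [skills.foldl (fun m s => PySem.Int.bor m ((1 : Int) <<< (skill_ids.getD s 0).toNat)) 0]) []
  let team_mask := pvSolve skills_by_person num_people ((1 <<< req_skills.length) - 1)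
  (PySem.List.pyRange 0 (num_people : Int) 1).filter
    (fun p => decide (PySem.Int.band (team_mask >>> p.toNat) 1 ≠ 0))

-- ===== PRECONDITION & SPEC =====
-- Pre_ excludes exactly the inputs where some person lists a skill that is not in req_skills:
-- there A (and B alike) raises KeyError on the dict lookup skill_ids[skill].
def Pre_smallestSufficientTeam_bottom_up_bitmap (req_skills : List String) (people : List (List String)) : Prop :=
  ∀ skills ∈ people, ∀ s ∈ skills, s ∈ req_skills
instance (req_skills : List String) (people : List (List String)) : Decidable (Pre_smallestSufficientTeam_bottom_up_bitmap req_skills people) := by unfold Pre_smallestSufficientTeam_bottom_up_bitmap; infer_instance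

def pvWitness_smallestSufficientTeam_bottom_up_bitmap : List String × List (List String) :=
  (["java", "nodejs"], [["nodejs"], ["java"], ["java", "nodejs"]])

def Spec_smallestSufficientTeam_bottom_up_bitmap (req_skills : List String) (people : List (List String)) (out : List Int) : Prop := out = smallestSufficientTeam_bottom_up_bitmap_alt req_skills people
instance (req_skills : List String) (people : List (List String)) (out : List Int) : Decidable (Spec_smallestSufficientTeam_bottom_up_bitmap req_skills people out) := by unfold Spec_smallestSufficientTeam_bottom_up_bitmap; infer_instance

-- ===== CLAIM (what is proved, stated in full; the proofs are below) =====
def Claim_equal_smallestSufficientTeam_bottom_up_bitmap : Prop := ∀ (req_skills : List String) (people : List (List String)), Dom_smallestSufficientTeam_bottom_up_bitmap req_skills people → Pre_smallestSufficientTeam_bottom_up_bitmap req_skills people → Spec_smallestSufficientTeam_bottom_up_bitmap req_skills people (smallestSufficientTeam_bottom_up_bitmap req_skills people)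

-- ===== LEMMAS AND PROOFS =====

-- (1 : Int) <<< k is the cast of the Nat shift
theorem pv_one_shl (k : Nat) : (1 : Int) <<< k = ((1 <<< k : Nat) : Int) := Int.mem_toNat?.mp rfl

-- `m & (1 << k) != 0` and `(m >> k) & 1 != 0` test the same bit
theorem pv_bit_iff (n k : Nat) : (n &&& (1 <<< k) ≠ 0) ↔ ((n >>> k) &&& 1 ≠ 0) := by
  simp [Nat.and_one_is_mod, Nat.shiftRight_eq_div_pow, Nat.shiftLeft_eq, Nat.and_two_pow, Nat.testBit]

-- lower/upper bound on `a & b` for nonnegative a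
theorem pv_band_bounds (a b : Int) (ha : 0 ≤ a) :
    0 ≤ PySem.Int.band a b ∧ PySem.Int.band a b ≤ a := by
  have hand := Nat.and_le_left (n := a.toNat) (m := b.toNat)
  unfold PySem.Int.band
  split_ifs <;> omega

theorem pvSolveGo_nil (sbp : List Int) (solve : Nat → Int) (mask : Nat) (best : Int) :
    pvSolveGo sbp solve mask [] best = best := rfl

theorem pvSolveGo_cons (sbp : List Int) (solve : Nat → Int) (mask : Nat) (person : Int)
    (rest : List Int) (best : Int) :
    pvSolveGo sbp solve mask (person :: rest) best =
      (if PySem.Int.band (mask : Int) (Int.not (PySem.List.pyGetD sbp person 0)) ≠ (mask : Int) then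
         pvSolveGo sbp solve mask rest
           (if PySem.Int.bitCount (PySem.Int.bor (solve (PySem.Int.band (mask : Int) (Int.not (PySem.List.pyGetD sbp person 0))).toNat) ((1 : Int) <<< person.toNat)) < PySem.Int.bitCount best
            then PySem.Int.bor (solve (PySem.Int.band (mask : Int) (Int.not (PySem.List.pyGetD sbp person 0))).toNat) ((1 : Int) <<< person.toNat)
            else best)
       else pvSolveGo sbp solve mask rest best) := rfl

-- pvSolveGo only queries `solve` at masks strictly below `mask`
theorem pvSolveGo_congr (sbp : List Int) (s1 s2 : Nat → Int) (mask : Nat)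
    (h : ∀ m < mask, s1 m = s2 m) :
    ∀ (ps : List Int) (best : Int), pvSolveGo sbp s1 mask ps best = pvSolveGo sbp s2 mask ps best := by
  intro ps
  induction ps with
  | nil => intro best; rfl
  | cons person rest ih =>
    intro best
    rw [pvSolveGo_cons, pvSolveGo_cons]
    have hband := pv_band_bounds (mask : Int) (Int.not (PySem.List.pyGetD sbp person 0)) (Int.natCast_nonneg mask)
    by_cases hne : PySem.Int.band (mask : Int) (Int.not (PySem.List.pyGetD sbp person 0)) ≠ (mask : Int)
    · rw [if_pos hne, if_pos hne, h _ (by omega), ih]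
    · rw [if_neg hne, if_neg hne]; exact ih best

-- any sufficient fuel computes the same value
theorem pvSolveFuel_congr (sbp : List Int) (P : Nat) :
    ∀ (mask f1 f2 : Nat), mask < f1 → mask < f2 →
      pvSolveFuel sbp P f1 mask = pvSolveFuel sbp P f2 mask := by
  intro mask
  induction mask using Nat.strong_induction_on with
  | _ mask ihm =>
    intro f1 f2 h1 h2
    obtain ⟨g1, rfl⟩ : ∃ g, f1 = g + 1 := ⟨f1 - 1, by omega⟩
    obtain ⟨g2, rfl⟩ : ∃ g, f2 = g + 1 := ⟨f2 - 1, by omega⟩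
    rw [pvSolveFuel, pvSolveFuel]
    by_cases h0 : mask = 0
    · rw [if_pos h0, if_pos h0]
    · rw [if_neg h0, if_neg h0]
      exact pvSolveGo_congr sbp _ _ mask
        (fun m hm => ihm m hm g1 g2 (by omega) (by omega)) _ _

theorem pvSolve_zero (sbp : List Int) (P : Nat) : pvSolve sbp P 0 = 0 := rfl

theorem pvSolve_pos (sbp : List Int) (P : Nat) (mask : Nat) (h : mask ≠ 0) :
    pvSolve sbp P mask =
      pvSolveGo sbp (pvSolve sbp P) mask (PySem.List.pyRange 0 (P : Int) 1) (((1 : Int) <<< P) - 1) := by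
  rw [pvSolve, pvSolveFuel, if_neg h]
  exact pvSolveGo_congr sbp _ _ mask
    (fun m hm => pvSolveFuel_congr sbp P m mask (m + 1) (by omega) (by omega)) _ _

theorem pv_go_nonneg (sbp : List Int) (P : Nat) :
    ∀ mask : Nat, (∀ m < mask, 0 ≤ pvSolve sbp P m) →
      ∀ (ps : List Int) (best : Int), 0 ≤ best → 0 ≤ pvSolveGo sbp (pvSolve sbp P) mask ps best := by
  intro mask hm ps
  induction ps with
  | nil => intro best hb; rw [pvSolveGo_nil]; exact hb
  | cons person rest ih =>
    intro best hb
    rw [pvSolveGo_cons]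
    have hband := pv_band_bounds (mask : Int) (Int.not (PySem.List.pyGetD sbp person 0)) (Int.natCast_nonneg mask)
    split_ifs with hne hlt
    · apply ih
      have hs : 0 ≤ pvSolve sbp P (PySem.Int.band (mask : Int) (Int.not (PySem.List.pyGetD sbp person 0))).toNat := by
        apply hm; omega
      rw [pv_one_shl, PySem.Int.bor_of_nonneg hs (Int.natCast_nonneg _)]
      exact Int.natCast_nonneg _
    · exact ih best hb
    · exact ih best hb

theorem pvSolve_nonneg (sbp : List Int) (P : Nat) : ∀ mask : Nat, 0 ≤ pvSolve sbp P mask := by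
  intro mask
  induction mask using Nat.strong_induction_on with
  | _ mask ihm =>
    by_cases h : mask = 0
    · rw [h, pvSolve_zero]
    · rw [pvSolve_pos sbp P mask h]
      apply pv_go_nonneg sbp P mask (fun m hm => ihm m hm)
      rw [pv_one_shl]
      have h1 : (1:Nat) ≤ 1 <<< P := by simp [Nat.shiftLeft_eq, Nat.one_le_two_pow]
      omega

theorem pv_getD_set_self (l : List Int) (i : Nat) (v : Int) (h : i < l.length) :
    (l.set i v).getD i 0 = v := by
  simp [List.getD, h]

theorem pv_getD_set_ne (l : List Int) (i j : Nat) (v : Int) (h : j ≠ i) :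
    (l.set i v).getD j 0 = l.getD j 0 := by
  simp [List.getD, List.getElem?_set_ne, (Ne.symm h)]

-- the inner person-loop of A computes exactly B's pvSolveGo in dp[skills]
theorem pv_inner_spec (sbp : List Int) (P : Nat) (skills : Int) (hs0 : 0 < skills) :
    ∀ (ps dp : List Int) (best : Int),
      skills.toNat < dp.length →
      dp.getD skills.toNat 0 = best →
      (∀ j : Nat, j < skills.toNat → dp.getD j 0 = pvSolve sbp P j) →
      (ps.foldl (pvAInnerBody sbp skills) dp).length = dp.length ∧
      (∀ j : Nat, j ≠ skills.toNat →
        (ps.foldl (pvAInnerBody sbp skills) dp).getD j 0 = dp.getD j 0) ∧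
      (ps.foldl (pvAInnerBody sbp skills) dp).getD skills.toNat 0 =
        pvSolveGo sbp (pvSolve sbp P) skills.toNat ps best := by
  intro ps
  induction ps with
  | nil =>
    intro dp best hlen hbest hlow
    exact ⟨rfl, fun j _ => rfl, by rw [pvSolveGo_nil]; exact hbest⟩
  | cons person rest ih =>
    intro dp best hlen hbest hlow
    have hsnn : (0:Int) ≤ skills := le_of_lt hs0
    have hsk : ((skills.toNat : Int)) = skills := Int.toNat_of_nonneg hsnn
    have hband := pv_band_bounds skills (Int.not (PySem.List.pyGetD sbp person 0)) hsnn
    simp only [List.foldl_cons, pvAInnerBody]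
    rw [pvSolveGo_cons, hsk]
    by_cases hne : PySem.Int.band skills (Int.not (PySem.List.pyGetD sbp person 0)) ≠ skills
    · rw [if_pos hne, if_pos hne]
      have hotn : (PySem.Int.band skills (Int.not (PySem.List.pyGetD sbp person 0))).toNat < skills.toNat := by
        have := lt_of_le_of_ne hband.2 hne
        omega
      have h1 : PySem.List.pyGetD dp (PySem.Int.band skills (Int.not (PySem.List.pyGetD sbp person 0))) 0 =
          pvSolve sbp P (PySem.Int.band skills (Int.not (PySem.List.pyGetD sbp person 0))).toNat := by
        rw [PySem.List.pyGetD_eq_getElem dp 0 hband.1 (by omega)]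
        rw [← List.getD_eq_getElem dp 0 (by omega)]
        exact hlow _ hotn
      have h2 : PySem.List.pyGetD dp skills 0 = best := by
        rw [PySem.List.pyGetD_eq_getElem dp 0 hsnn (by omega)]
        rw [← List.getD_eq_getElem dp 0 (by omega)]
        exact hbest
      rw [h1, h2]
      by_cases hlt : PySem.Int.bitCount (PySem.Int.bor (pvSolve sbp P (PySem.Int.band skills (Int.not (PySem.List.pyGetD sbp person 0))).toNat) ((1 : Int) <<< person.toNat)) < PySem.Int.bitCount best
      · rw [if_pos hlt, if_pos hlt]
        rw [PySem.List.pySetD_of_nonneg dp _ hsnn]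
        obtain ⟨l1, l2, l3⟩ := ih
          (dp.set skills.toNat (PySem.Int.bor (pvSolve sbp P (PySem.Int.band skills (Int.not (PySem.List.pyGetD sbp person 0))).toNat) ((1 : Int) <<< person.toNat)))
          (PySem.Int.bor (pvSolve sbp P (PySem.Int.band skills (Int.not (PySem.List.pyGetD sbp person 0))).toNat) ((1 : Int) <<< person.toNat))
          (by simpa using hlen)
          (pv_getD_set_self dp skills.toNat _ hlen)
          (fun j hj => by rw [pv_getD_set_ne dp skills.toNat j _ (by omega)]; exact hlow j hj)
        refine ⟨by simpa using l1, fun j hj => ?_, l3⟩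
        rw [l2 j hj, pv_getD_set_ne dp skills.toNat j _ hj]
      · rw [if_neg hlt, if_neg hlt]
        exact ih dp best hlen hbest hlow
    · rw [if_neg hne, if_neg hne]
      exact ih dp best hlen hbest hlow

-- the initial dp array
theorem pv_dp0_spec (P k : Nat) :
    ((List.replicate (1 <<< k) (((1:Int) <<< P) - 1)).set 0 0).length = 1 <<< k ∧
    ∀ j : Nat, j < 1 <<< k →
      ((List.replicate (1 <<< k) (((1:Int) <<< P) - 1)).set 0 0).getD j 0 =
        if j = 0 then 0 else ((1:Int) <<< P) - 1 := by
  refine ⟨by simp, fun j hj => ?_⟩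
  by_cases hj0 : j = 0
  · subst hj0
    rw [pv_getD_set_self _ _ _ (by simpa using hj), if_pos rfl]
  · rw [pv_getD_set_ne _ _ _ _ hj0, if_neg hj0]
    simp [List.getD, hj]

-- A's outer loop over range(1, 1 << k), cut off after t iterations: dp holds pvSolve below t
theorem pv_outer_spec (sbp : List Int) (P k : Nat) :
    ∀ t : Nat, t ≤ 1 <<< k →
      ((PySem.List.pyRange 1 (t : Int) 1).foldl (pvADpStep sbp P)
        ((List.replicate (1 <<< k) (((1:Int) <<< P) - 1)).set 0 0)).length = 1 <<< k ∧
      ∀ j : Nat, j < 1 <<< k →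
        ((PySem.List.pyRange 1 (t : Int) 1).foldl (pvADpStep sbp P)
          ((List.replicate (1 <<< k) (((1:Int) <<< P) - 1)).set 0 0)).getD j 0 =
          if j = 0 then 0 else if j < t then pvSolve sbp P j else ((1:Int) <<< P) - 1 := by
  intro t
  induction t with
  | zero =>
    intro _
    rw [PySem.List.pyRange_one_eq_nil (by norm_num), List.foldl_nil]
    obtain ⟨h1, h2⟩ := pv_dp0_spec P k
    exact ⟨h1, fun j hj => by rw [h2 j hj]; split_ifs <;> simp_all⟩
  | succ t iht =>
    intro hle
    by_cases ht0 : t = 0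
    · subst ht0
      rw [show ((0+1 : Nat) : Int) = 1 by norm_num, PySem.List.pyRange_one_eq_nil le_rfl, List.foldl_nil]
      obtain ⟨h1, h2⟩ := pv_dp0_spec P k
      refine ⟨h1, fun j hj => ?_⟩
      rw [h2 j hj]
      split_ifs with e1 e2 <;> first | rfl | omega
    · have ht1 : 1 ≤ t := Nat.one_le_iff_ne_zero.mpr ht0
      obtain ⟨ihlen, ihval⟩ := iht (by omega)
      have hcast : ((t + 1 : Nat) : Int) = (t : Int) + 1 := by push_cast; ring
      rw [hcast, PySem.List.pyRange_one_succ_right (by exact_mod_cast ht1), List.foldl_append,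
        List.foldl_cons, List.foldl_nil]
      simp only [pvADpStep]
      have hs0 : (0 : Int) < (t : Int) := by exact_mod_cast ht1
      have htn : ((t : Int)).toNat = t := Int.toNat_natCast t
      obtain ⟨L1, L2, L3⟩ := pv_inner_spec sbp P (t : Int) hs0 (PySem.List.pyRange 0 (P : Int) 1)
        ((PySem.List.pyRange 1 (t : Int) 1).foldl (pvADpStep sbp P)
          ((List.replicate (1 <<< k) (((1:Int) <<< P) - 1)).set 0 0))
        (((1:Int) <<< P) - 1)
        (by rw [htn, ihlen]; omega)
        (by rw [htn, ihval t (by omega)]; simp [ht0])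
        (fun j hj => by
          rw [htn] at hj
          rw [ihval j (by omega)]
          by_cases hj0 : j = 0
          · subst hj0; rw [if_pos rfl, pvSolve_zero]
          · rw [if_neg hj0, if_pos hj])
      rw [htn] at L2 L3
      refine ⟨by rw [L1, ihlen], fun j hj => ?_⟩
      by_cases hjt : j = t
      · subst hjt
        rw [L3, ← pvSolve_pos sbp P j ht0]
        rw [if_neg ht0, if_pos (by omega)]
      · rw [L2 j hjt, ihval j hj]
        split_ifs <;> first | rfl | omega

-- the two membership tests in the extraction loops agree on nonnegative masks
theorem pv_cond (m : Int) (hm : 0 ≤ m) (x : Int) :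
    (PySem.Int.band m ((1:Int) <<< (x.toNat : Int)) ≠ 0) ↔
      (PySem.Int.band (m >>> (x.toNat : Int)) 1 ≠ 0) := by
  obtain ⟨n, rfl⟩ : ∃ n : Nat, m = (n : Int) := ⟨m.toNat, (Int.toNat_of_nonneg hm).symm⟩
  rw [Int.shiftLeft_natCast_right, Int.shiftRight_natCast]
  rw [pv_one_shl, show (1:Int) = ((1:Nat) : Int) from rfl,
    PySem.Int.band_natCast, PySem.Int.band_natCast]
  rw [Ne, Ne, Int.natCast_eq_zero, Int.natCast_eq_zero]
  exact pv_bit_iff n x.toNat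

-- A's whole pipeline after skills_by_person equals B's
theorem pv_bridge (sbp : List Int) (P k : Nat) :
    (PySem.List.pyRange 0 (P : Int) 1).foldl
      (fun team person =>
        if PySem.Int.band
            (PySem.List.pyGetD
              ((PySem.List.pyRange 1 ((1 <<< k : Nat) : Int) 1).foldl (pvADpStep sbp P)
                (PySem.List.pySetD (PySem.List.pyRepeat [((1:Int) <<< P) - 1] ((1 <<< k : Nat) : Int)) 0 0))
              (-1) 0)
            ((1:Int) <<< person.toNat) ≠ 0
        then team ++ [person] else team) []
    = (PySem.List.pyRange 0 (P : Int) 1).filter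
        (fun p => decide (PySem.Int.band ((pvSolve sbp P ((1 <<< k) - 1)) >>> p.toNat) 1 ≠ 0)) := by
  have hM1 : (1:Nat) ≤ 1 <<< k := by simp [Nat.shiftLeft_eq, Nat.one_le_two_pow]
  have hdp0 : PySem.List.pySetD (PySem.List.pyRepeat [((1:Int) <<< P) - 1] ((1 <<< k : Nat) : Int)) 0 0
      = (List.replicate (1 <<< k) (((1:Int) <<< P) - 1)).set 0 0 := by
    rw [PySem.List.pyRepeat_singleton, PySem.List.pySetD_of_nonneg _ _ le_rfl,
      show ((1 <<< k : Nat) : Int).toNat = (1 <<< k : Nat) from by omega]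
    rfl
  rw [hdp0]
  obtain ⟨hlen, hval⟩ := pv_outer_spec sbp P k (1 <<< k) le_rfl
  have hne : (PySem.List.pyRange 1 ((1 <<< k : Nat) : Int) 1).foldl (pvADpStep sbp P)
      ((List.replicate (1 <<< k) (((1:Int) <<< P) - 1)).set 0 0) ≠ [] := by
    apply List.ne_nil_of_length_pos; omega
  have htm : PySem.List.pyGetD
      ((PySem.List.pyRange 1 ((1 <<< k : Nat) : Int) 1).foldl (pvADpStep sbp P)
        ((List.replicate (1 <<< k) (((1:Int) <<< P) - 1)).set 0 0)) (-1) 0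
      = pvSolve sbp P ((1 <<< k) - 1) := by
    rw [PySem.List.pyGetD_neg_one _ _ hne, List.getLast_eq_getElem,
      ← List.getD_eq_getElem _ 0 (by omega), hlen, hval (1 <<< k - 1) (by omega)]
    by_cases hk : 1 <<< k - 1 = 0
    · rw [if_pos hk, hk, pvSolve_zero]
    · rw [if_neg hk, if_pos (by omega)]
  rw [htm]
  refine Eq.trans (PySem.List.foldl_append_ite_eq_filter
    (fun person => PySem.Int.band (pvSolve sbp P ((1 <<< k) - 1)) ((1:Int) <<< person.toNat) ≠ 0)
    (PySem.List.pyRange 0 (P : Int) 1) []) ?_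
  rw [List.nil_append]
  apply List.filter_congr
  intro x _
  have := pv_cond (pvSolve sbp P ((1 <<< k) - 1)) (pvSolve_nonneg sbp P _) x.toNat
  simp only [decide_eq_decide]
  exact this

-- ===== VERDICT (by name: the statement is the Claim_ definition above) =====
theorem smallestSufficientTeam_bottom_up_bitmap_spec : Claim_equal_smallestSufficientTeam_bottom_up_bitmap := by
  intro req_skills people _ _
  unfold Spec_smallestSufficientTeam_bottom_up_bitmap
  unfold smallestSufficientTeam_bottom_up_bitmap smallestSufficientTeam_bottom_up_bitmap_alt
  simp only [PySem.List.foldl_append_singleton_eq_map, List.nil_append,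
    ← Int.shiftRight_natCast_right]
  exact pv_bridge _ _ _
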